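-- pv_equiv track=rewrite | github.com/cyanbx/Prompt-Singer | data_scripts/duplicate_phone.py | cnt_diff
-- ===== SOURCE A (Python) =====
-- def cnt_diff(ref, gen):
--     diff = abs(len(ref) - len(gen))
--     min_len = min(len(ref), len(gen))
--     cnt = 0
--     for i in range(min_len):
--         if ref[i] != gen[i] and not (ref[i] == 'SP' and gen[i] == 'AP' or ref[i] == 'AP' and gen[i] == 'SP'):
--             cnt += 1
--
--     return cnt, diff
-- ===== SOURCE B (Python) =====
-- def cnt_diff(ref, gen):
--     m = min(len(ref), len(gen))
--     ref_set = {(i, 'SP' if x == 'AP' else x) for i, x in enumerate(ref[:m])}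
--     gen_set = {(i, 'SP' if x == 'AP' else x) for i, x in enumerate(gen[:m])}
--     return len(ref_set - gen_set), abs(len(ref) - len(gen))
-- ===== Notes on version B (the rewrite author's own statement) =====
-- stated objective: alternative
-- what changed: B replaces A's positional comparison loop with a hash-set computation: it builds sets of (index, normalized element) pairs for both prefixes (collapsing 'AP' to 'SP') and returns the size of their set difference, so no element-by-element comparison or SP/AP case analysis occurs at all.
import Mathlib
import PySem

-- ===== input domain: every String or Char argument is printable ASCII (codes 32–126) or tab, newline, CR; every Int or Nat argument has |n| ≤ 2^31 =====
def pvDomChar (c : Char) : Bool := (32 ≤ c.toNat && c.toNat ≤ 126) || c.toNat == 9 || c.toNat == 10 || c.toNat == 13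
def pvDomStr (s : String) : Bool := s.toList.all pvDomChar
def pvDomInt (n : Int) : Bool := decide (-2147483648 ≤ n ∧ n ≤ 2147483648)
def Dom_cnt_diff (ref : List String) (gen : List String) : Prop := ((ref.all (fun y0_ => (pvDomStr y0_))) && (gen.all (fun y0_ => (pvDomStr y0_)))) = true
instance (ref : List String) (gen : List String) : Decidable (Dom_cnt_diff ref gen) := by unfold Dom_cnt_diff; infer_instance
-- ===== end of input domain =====

-- B replaces A's positional comparison loop by a set computation: it builds sets of
-- (index, normalized element) pairs for both prefixes (collapsing 'AP' to 'SP') and returns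
-- the size of their set difference (objective: alternative; no comparison loop at all).

-- ===== PORT A =====
def cnt_diff (ref : List String) (gen : List String) : Int × Int :=
  let diff : Int := |(ref.length : Int) - (gen.length : Int)|
  let min_len : Int := min (ref.length : Int) (gen.length : Int)
  let cnt : Int := (PySem.List.pyRange 0 min_len).foldl (fun c i =>
    if PySem.List.pyGetD ref i "" ≠ PySem.List.pyGetD gen i "" ∧
       ¬ ((PySem.List.pyGetD ref i "" = "SP" ∧ PySem.List.pyGetD gen i "" = "AP") ∨
          (PySem.List.pyGetD ref i "" = "AP" ∧ PySem.List.pyGetD gen i "" = "SP"))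
    then c + 1 else c) 0
  (cnt, diff)

-- ===== PORT B =====
def cnt_diff_alt (ref : List String) (gen : List String) : Int × Int :=
  let m : Nat := min ref.length gen.length
  let ref_set : PySem.Set (Int × String) :=
    PySem.Set.ofList ((PySem.List.enumerate (ref.take m) 0).map
      (fun p => (p.1, if p.2 = "AP" then "SP" else p.2)))
  let gen_set : PySem.Set (Int × String) :=
    PySem.Set.ofList ((PySem.List.enumerate (gen.take m) 0).map
      (fun p => (p.1, if p.2 = "AP" then "SP" else p.2)))
  ((PySem.Set.len (PySem.Set.diff ref_set gen_set) : Int),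
   |(ref.length : Int) - (gen.length : Int)|)

-- ===== PRECONDITION & SPEC =====
def Spec_cnt_diff (ref : List String) (gen : List String) (out : Int × Int) : Prop := out = cnt_diff_alt ref gen
instance (ref : List String) (gen : List String) (out : Int × Int) : Decidable (Spec_cnt_diff ref gen out) := by unfold Spec_cnt_diff; infer_instance

-- ===== CLAIM (what is proved, stated in full; the proofs are below) =====
def Claim_equal_cnt_diff : Prop := ∀ (ref : List String) (gen : List String), Dom_cnt_diff ref gen → Spec_cnt_diff ref gen (cnt_diff ref gen)

-- ===== LEMMAS AND PROOFS =====

-- the normalization both sides effectively apply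
def pvNorm (x : String) : String := if x = "AP" then "SP" else x

-- A's branch condition fires exactly when the normalized elements differ
theorem pvCond_iff (a b : String) :
    (a ≠ b ∧ ¬ ((a = "SP" ∧ b = "AP") ∨ (a = "AP" ∧ b = "SP"))) ↔ pvNorm a ≠ pvNorm b := by
  unfold pvNorm
  split_ifs with h1 h2 h2 <;> simp_all
  tauto

-- A's loop over the first n indices counts the positions (below n) with differing normalized elements
theorem pvLoop (ref gen : List String) (n : Nat) (hn : n ≤ min ref.length gen.length) (c0 : Int) :
    ((List.range n).foldl (fun c (k : Nat) =>
      if PySem.List.pyGetD ref (k : Int) "" ≠ PySem.List.pyGetD gen (k : Int) "" ∧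
         ¬ ((PySem.List.pyGetD ref (k : Int) "" = "SP" ∧ PySem.List.pyGetD gen (k : Int) "" = "AP") ∨
            (PySem.List.pyGetD ref (k : Int) "" = "AP" ∧ PySem.List.pyGetD gen (k : Int) "" = "SP"))
      then c + 1 else c) c0)
    = c0 + (((ref.zip gen).take n).countP (fun p => pvNorm p.1 ≠ pvNorm p.2) : Nat) := by
  induction n generalizing c0 with
  | zero => simp
  | succ m ih =>
    have hm : m < (ref.zip gen).length := by
      simp only [List.length_zip]; omega
    have hr : (m : Nat) < ref.length := by omega
    have hg : (m : Nat) < gen.length := by omega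
    rw [List.range_succ, List.foldl_append]
    rw [ih (by omega)]
    have htake : (ref.zip gen).take (m + 1) = (ref.zip gen).take m ++ [(ref.zip gen)[m]] := by
      rw [List.take_add_one]
      simp [List.getElem?_eq_getElem hm]
    rw [htake, List.countP_append]
    have hget : (ref.zip gen)[m] = (ref[m], gen[m]) := by
      simp [List.getElem_zip]
    simp only [List.foldl_cons, List.foldl_nil,
      PySem.List.pyGetD_natCast, List.getD_eq_getElem?_getD,
      List.getElem?_eq_getElem hr, List.getElem?_eq_getElem hg, Option.getD_some, hget]
    by_cases hc : pvNorm ref[m] ≠ pvNorm gen[m]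
    · rw [if_pos ((pvCond_iff _ _).2 hc)]
      simp [hc]
      ring
    · rw [if_neg (fun h => hc ((pvCond_iff _ _).1 h))]
      simp at hc
      simp [hc]

-- every index in enumerate xs s is at least s
theorem pvEnum_fst_ge {α : Type} (xs : List α) (s : Int) (p : Int × α)
    (hp : p ∈ PySem.List.enumerate xs s) : s ≤ p.1 := by
  rcases (PySem.List.mem_enumerate_iff xs s p).1 hp with ⟨k, hk, rfl⟩
  simp

-- mapping only the second components commutes with enumerate
theorem pvEnum_map {α β : Type} (f : α → β) (xs : List α) (s : Int) :
    (PySem.List.enumerate xs s).map (fun p => (p.1, f p.2))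
      = PySem.List.enumerate (xs.map f) s := by
  induction xs generalizing s with
  | nil => simp [PySem.List.enumerate_nil]
  | cons x xs ih => simp [PySem.List.enumerate_cons, ih]

-- the set-difference count over enumerated pairs equals the positional mismatch count
theorem pvDiffCount {α : Type} [DecidableEq α] (xs ys : List α) (s : Int)
    (hlen : xs.length = ys.length) :
    ((PySem.List.enumerate xs s).filter
        (fun p => !(PySem.List.enumerate ys s).contains p)).length
    = (xs.zip ys).countP (fun p => p.1 ≠ p.2) := by
  induction xs generalizing ys s with
  | nil => cases ys with
    | nil => simp
    | cons y ys => simp at hlen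
  | cons x xs ih =>
    cases ys with
    | nil => simp at hlen
    | cons y ys =>
      simp only [List.length_cons] at hlen
      rw [PySem.List.enumerate_cons, PySem.List.enumerate_cons]
      rw [List.filter_cons]
      have h2 : (s, x) ∉ PySem.List.enumerate ys (s + 1) := by
        intro h
        have := pvEnum_fst_ge ys (s + 1) _ h
        simp at this
      have hmem : ((s, y) :: PySem.List.enumerate ys (s + 1)).contains (s, x) = (x == y) := by
        by_cases hxy : x = y
        · subst hxy; simp
        · simp only [List.contains_eq_mem]
          simp [h2, hxy, Prod.ext_iff]
      have htail : (PySem.List.enumerate xs (s + 1)).filter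
            (fun p => !((s, y) :: PySem.List.enumerate ys (s + 1)).contains p)
          = (PySem.List.enumerate xs (s + 1)).filter
            (fun p => !(PySem.List.enumerate ys (s + 1)).contains p) := by
        apply List.filter_congr
        intro p hp
        have hge := pvEnum_fst_ge xs (s + 1) p hp
        have hne : p ≠ (s, y) := by
          intro h; subst h; simp at hge
        simp only [List.contains_cons]
        simp [hne]
      rw [hmem, htail]
      by_cases hxy : x = y
      · rw [if_neg (by simp [hxy]), ih ys (s + 1) (by omega)]
        simp [hxy]
      · rw [if_pos (by simp [hxy]), List.length_cons, ih ys (s + 1) (by omega)]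
        simp only [List.zip_cons_cons, List.countP_cons]
        simp [hxy]

-- an enumerated list is Nodup (its first components are strictly increasing)
theorem pvEnum_nodup {α : Type} (xs : List α) (s : Int) :
    (PySem.List.enumerate xs s).Nodup := by
  have h := PySem.List.pairwise_lt_enumerate (xs := xs) (s := s)
  refine h.imp ?_
  intro a b hab heq
  rw [heq] at hab
  exact lt_irrefl _ hab

-- ===== VERDICT (by name: the statement is the Claim_ definition above) =====
theorem cnt_diff_spec : Claim_equal_cnt_diff := by
  intro ref gen _
  unfold Spec_cnt_diff cnt_diff cnt_diff_alt
  dsimp only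
  have hmin : min ((ref.length : Int)) ((gen.length : Int)) = ((min ref.length gen.length : Nat) : Int) := by
    push_cast; rfl
  rw [hmin, PySem.List.pyRange_zero_natCast, List.foldl_map]
  rw [pvLoop ref gen (min ref.length gen.length) (le_refl _) 0]
  set m := min ref.length gen.length with hm
  have hmapr := pvEnum_map pvNorm (ref.take m) 0
  have hmapg := pvEnum_map pvNorm (gen.take m) 0
  have hnormdef : (fun (p : Int × String) => (p.1, if p.2 = "AP" then "SP" else p.2))
      = (fun p => (p.1, pvNorm p.2)) := rfl
  rw [hnormdef, hmapr, hmapg]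
  rw [PySem.Set.ofList_eq_self_of_nodup _ (pvEnum_nodup ((ref.take m).map pvNorm) 0),
      PySem.Set.ofList_eq_self_of_nodup _ (pvEnum_nodup ((gen.take m).map pvNorm) 0)]
  have hdiff : PySem.Set.diff (PySem.List.enumerate ((ref.take m).map pvNorm) 0)
        (PySem.List.enumerate ((gen.take m).map pvNorm) 0)
      = (PySem.List.enumerate ((ref.take m).map pvNorm) 0).filter
          (fun p => !(PySem.List.enumerate ((gen.take m).map pvNorm) 0).contains p) := rfl
  have hcnt := pvDiffCount ((ref.take m).map pvNorm) ((gen.take m).map pvNorm) 0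
    (by simp; omega)
  have hzip : ((ref.take m).map pvNorm).zip ((gen.take m).map pvNorm)
      = ((ref.zip gen).take m).map (Prod.map pvNorm pvNorm) := by
    simp only [List.zip_eq_zipWith]
    rw [List.take_zipWith, List.map_zipWith, List.zipWith_map]
    rfl
  have hlen : PySem.Set.len (PySem.Set.diff (PySem.List.enumerate ((ref.take m).map pvNorm) 0)
        (PySem.List.enumerate ((gen.take m).map pvNorm) 0))
      = ((((ref.zip gen).take m).countP (fun p => pvNorm p.1 ≠ pvNorm p.2) : Nat) : Int) := by
    show (List.length _ : Int) = _
    rw [hdiff, hcnt, hzip, List.countP_map]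
    rfl
  rw [hlen]
  simp
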